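-- pv_equiv track=rewrite | github.com/MFCo/advent-of-code | 2024/day-9/part2.py | find_file_positions
-- ===== SOURCE A (Python) =====
-- def find_file_positions(blocks):
--     file_positions = {}
--     current_file = None
--     start_pos = 0
--     length = 0
--     for pos, file_id in enumerate(blocks + [None]): #this should count the last one too, if you are reading this, I was missing the last one for a while, sad
--         if file_id != current_file:
--             if current_file is not None:
--                 file_positions[current_file] = (start_pos, length)
--             current_file = file_id
--             start_pos = pos
--             length = 1
--         else:
--             length += 1
--     return file_positions
-- ===== SOURCE B (Python) =====
-- def find_file_positions(blocks):
--     # Two-pointer run scan: find each maximal run [i, j) directly, no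
--     # sentinel element and no carried state machine.
--     file_positions = {}
--     i = 0
--     n = len(blocks)
--     while i < n:
--         j = i + 1
--         while j < n and blocks[j] == blocks[i]:
--             j += 1
--         if blocks[i] is not None:
--             file_positions[blocks[i]] = (i, j - i)
--         i = j
--     return file_positions
-- ===== Notes on version B (the rewrite author's own statement) =====
-- stated objective: alternative
-- what changed: Replaces the one-element-at-a-time state machine (current_file/start_pos/length carried across iterations, with an appended None sentinel to flush the last run) by a two-pointer scan that locates each maximal run [i, j) directly and records it immediately.
import Mathlib
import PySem

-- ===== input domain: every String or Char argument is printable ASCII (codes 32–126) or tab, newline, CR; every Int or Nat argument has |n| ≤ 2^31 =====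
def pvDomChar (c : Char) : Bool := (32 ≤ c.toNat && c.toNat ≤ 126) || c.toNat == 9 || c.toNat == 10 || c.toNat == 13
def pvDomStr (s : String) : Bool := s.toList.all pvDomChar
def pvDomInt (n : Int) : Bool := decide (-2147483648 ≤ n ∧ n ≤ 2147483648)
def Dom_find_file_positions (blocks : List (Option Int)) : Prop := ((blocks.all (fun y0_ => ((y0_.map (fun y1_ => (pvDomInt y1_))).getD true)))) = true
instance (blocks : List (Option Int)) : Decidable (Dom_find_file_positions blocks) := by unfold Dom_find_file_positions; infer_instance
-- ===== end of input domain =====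

-- B replaces A's per-element state machine (current/start/length + appended None sentinel)
-- by a two-pointer maximal-run scan; same cost, proved to return the same dict.


-- ===== PORT A =====
-- one loop step of A: state = (file_positions, current_file, start_pos, length)
def aStep (st : PySem.Dict Int (Int × Int) × Option Int × Int × Int)
    (pf : Int × Option Int) : PySem.Dict Int (Int × Int) × Option Int × Int × Int :=
  let (fp, cur, start, len) := st
  let (pos, fid) := pf
  if fid ≠ cur then
    let fp' := match cur with
      | some k => fp.insert k (start, len)
      | none => fp
    (fp', fid, pos, 1)
  else
    (fp, cur, start, len + 1)

def find_file_positions (blocks : List (Option Int)) : List (Int × Int × Int) :=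
  let st := (PySem.List.enumerate (blocks ++ [none]) 0).foldl aStep
      (PySem.Dict.empty, none, 0, 0)
  st.1.items

-- ===== PORT B =====
-- inner while loop of B: count of further elements equal to x, and the remainder
def takeRun (x : Option Int) : List (Option Int) → Nat × List (Option Int)
  | [] => (0, [])
  | y :: ys => if y = x then let p := takeRun x ys; (p.1 + 1, p.2) else (0, y :: ys)

theorem takeRun_len_le (x : Option Int) :
    ∀ xs : List (Option Int), (takeRun x xs).2.length ≤ xs.length := by
  intro xs
  induction xs with
  | nil => simp [takeRun]
  | cons y ys ih =>
    simp only [takeRun]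
    split
    · exact le_trans ih (by simp)
    · simp

-- outer while loop of B
def bRuns : List (Option Int) → Int → PySem.Dict Int (Int × Int) → PySem.Dict Int (Int × Int)
  | [], _, d => d
  | x :: xs, pos, d =>
    let p := takeRun x xs
    let n : Int := (p.1 : Int) + 1
    let d' := match x with
      | some k => d.insert k (pos, n)
      | none => d
    bRuns p.2 (pos + n) d'
termination_by l => l.length
decreasing_by exact Nat.lt_succ_of_le (takeRun_len_le x xs)

def find_file_positions_alt (blocks : List (Option Int)) : List (Int × Int × Int) :=
  (bRuns blocks 0 PySem.Dict.empty).items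

-- ===== PRECONDITION & SPEC =====
def Spec_find_file_positions (blocks : List (Option Int)) (out : List (Int × Int × Int)) : Prop := out = find_file_positions_alt blocks
instance (blocks : List (Option Int)) (out : List (Int × Int × Int)) : Decidable (Spec_find_file_positions blocks out) := by unfold Spec_find_file_positions; infer_instance

-- ===== CLAIM (what is proved, stated in full; the proofs are below) =====
def Claim_equal_find_file_positions : Prop := ∀ (blocks : List (Option Int)), Dom_find_file_positions blocks → Spec_find_file_positions blocks (find_file_positions blocks)

-- ===== LEMMAS AND PROOFS =====

-- pending insert performed by A when the current run ends
def insertIf (c : Option Int) (p : Int × Int) (d : PySem.Dict Int (Int × Int)) :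
    PySem.Dict Int (Int × Int) :=
  match c with
  | some k => d.insert k p
  | none => d

theorem takeRun_spec (x : Option Int) :
    ∀ xs : List (Option Int),
      xs = List.replicate (takeRun x xs).1 x ++ (takeRun x xs).2 ∧
      (∀ z zs, (takeRun x xs).2 = z :: zs → z ≠ x) := by
  intro xs
  induction xs with
  | nil => simp [takeRun]
  | cons y ys ih =>
    simp only [takeRun]
    by_cases h : y = x
    · simp only [if_pos h]
      refine ⟨?_, ih.2⟩
      conv_lhs => rw [ih.1]
      simp [List.replicate_succ, h]
    · simp only [if_neg h]
      exact ⟨rfl, by intro z zs hz; injection hz with h1 _; exact h1 ▸ h⟩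

theorem bRuns_cons (x : Option Int) (xs : List (Option Int)) (pos : Int)
    (d : PySem.Dict Int (Int × Int)) :
    bRuns (x :: xs) pos d
      = bRuns (takeRun x xs).2 (pos + ((takeRun x xs).1 + 1))
          (insertIf x (pos, (takeRun x xs).1 + 1) d) := by
  cases x <;> (rw [bRuns.eq_def]; rfl)

-- A's fold absorbs a replicate of the current element into length
theorem foldA_replicate (c : Option Int) :
    ∀ (m : Nat) (tail : List (Option Int)) (p : Int)
      (d : PySem.Dict Int (Int × Int)) (s l : Int),
      (PySem.List.enumerate (List.replicate m c ++ tail) p).foldl aStep (d, c, s, l)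
        = (PySem.List.enumerate tail (p + m)).foldl aStep (d, c, s, l + m) := by
  intro m
  induction m with
  | zero => intro tail p d s l; simp
  | succ m ih =>
    intro tail p d s l
    rw [List.replicate_succ, List.cons_append, PySem.List.enumerate_cons, List.foldl_cons]
    have hstep : aStep (d, c, s, l) (p, c) = (d, c, s, l + 1) := by
      simp [aStep]
    rw [hstep, ih]
    congr 1 <;> push_cast <;> ring

-- main invariant: A's fold from a pending run (c, s, l), positioned at s + l,
-- equals B's run scan after flushing the pending run
theorem main_inv :
    ∀ (N : Nat) (blocks : List (Option Int)) (c : Option Int) (s l : Int)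
      (d : PySem.Dict Int (Int × Int)),
      blocks.length ≤ N →
      (∀ z zs, blocks = z :: zs → z = c → c = none) →
      ((PySem.List.enumerate (blocks ++ [none]) (s + l)).foldl aStep (d, c, s, l)).1
        = bRuns blocks (s + l) (insertIf c (s, l) d) := by
  intro N
  induction N with
  | zero =>
    intro blocks c s l d hN _
    have hb : blocks = [] := List.eq_nil_of_length_eq_zero (Nat.le_zero.mp hN)
    subst hb
    simp only [List.nil_append, PySem.List.enumerate_cons, PySem.List.enumerate_nil,
      List.foldl_cons, List.foldl_nil, bRuns]
    cases c with
    | none => simp [aStep, insertIf]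
    | some k => simp [aStep, insertIf]
  | succ N ih =>
    intro blocks c s l d hN hhd
    cases blocks with
    | nil =>
      simp only [List.nil_append, PySem.List.enumerate_cons, PySem.List.enumerate_nil,
        List.foldl_cons, List.foldl_nil, bRuns]
      cases c with
      | none => simp [aStep, insertIf]
      | some k => simp [aStep, insertIf]
    | cons x xs =>
      obtain ⟨hrep, hrest⟩ := takeRun_spec x xs
      set m := (takeRun x xs).1 with hm
      set rest := (takeRun x xs).2 with hr
      have hxsN : xs.length ≤ N := by simpa using hN
      have hlen : rest.length ≤ N := by
        have := congrArg List.length hrep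
        simp only [List.length_append, List.length_replicate] at this
        omega
      rw [List.cons_append, PySem.List.enumerate_cons, List.foldl_cons]
      by_cases hxc : x = c
      · -- run continues: c must be none
        have hc : c = none := hhd x xs rfl hxc
        subst hc
        have hstep : aStep (d, none, s, l) (s + l, x) = (d, none, s, l + 1) := by
          simp [aStep, hxc]
        rw [hstep]
        conv_lhs => rw [hrep, hxc, List.append_assoc]
        rw [foldA_replicate]
        have hidx : s + l + 1 + (m : Int) = s + (l + 1 + m) := by ring
        rw [hidx]
        have := ih rest none s (l + 1 + m) d hlen
          (by intro z zs _ _; rfl)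
        rw [this, bRuns_cons, ← hm, ← hr, hxc]
        simp only [insertIf]
        congr 1
        ring
      · -- new run starts at position s + l
        have hstep : aStep (d, c, s, l) (s + l, x) = (insertIf c (s, l) d, x, s + l, 1) := by
          unfold aStep insertIf
          simp [hxc]
        rw [hstep]
        conv_lhs => rw [hrep, List.append_assoc]
        rw [foldA_replicate]
        have hidx : s + l + 1 + (m : Int) = (s + l) + (1 + m) := by ring
        rw [hidx]
        have := ih rest x (s + l) (1 + (m : Int)) (insertIf c (s, l) d) hlen
          (by intro z zs hz hzx; exact absurd hzx (hrest z zs hz))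
        rw [this, bRuns_cons]
        have : s + l + (1 + (m : Int)) = s + l + ((m : Int) + 1) := by ring
        rw [this]
        have : ((1 : Int) + (m : Int)) = ((m : Int) + 1) := by ring
        rw [this]

-- ===== VERDICT (by name: the statement is the Claim_ definition above) =====
theorem find_file_positions_spec : Claim_equal_find_file_positions := by
  intro blocks _
  unfold Spec_find_file_positions find_file_positions find_file_positions_alt
  have h := main_inv blocks.length blocks none 0 0 PySem.Dict.empty le_rfl
    (by intro z zs _ _; rfl)
  simp only [insertIf] at h
  simpa using congrArg PySem.Dict.items h
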